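-- pv_equiv track=rewrite | github.com/myc9799/Online-Time-series-Stock-Price-Trading-Algorithm | RollingMean/trade.py | get_next_buy_point
-- ===== SOURCE A (Python) =====
-- def get_next_buy_point(sell_point, check_low_list):
--     i = 0
--     j = len(check_low_list) - 1
--     res = j
--     if check_low_list[j] <= sell_point:
--         return 0
--     while i <= j:
--         mid = (i + j) // 2
--         if sell_point < check_low_list[mid]:
--             res = mid
--             j = mid - 1
--         else:
--             i = mid + 1
--
--     return check_low_list[res]
-- ===== SOURCE B (Python) =====
-- def _probe(sell_point, xs, lo, length):
--     # value at the first probe in xs[lo:lo+length] (along the halving path)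
--     # that exceeds sell_point, propagated back up; None if no probe exceeds it
--     if length == 0:
--         return None
--     half = (length - 1) // 2
--     v = xs[lo + half]
--     if sell_point < v:
--         found = _probe(sell_point, xs, lo, half)
--         return v if found is None else found
--     return _probe(sell_point, xs, lo + half + 1, length - half - 1)
--
--
-- def get_next_buy_point(sell_point, check_low_list):
--     if check_low_list[-1] <= sell_point:
--         return 0
--     found = _probe(sell_point, check_low_list, 0, len(check_low_list))
--     return check_low_list[-1] if found is None else found
-- ===== Notes on version B (the rewrite author's own statement) =====
-- stated objective: alternative
-- what changed: Replaces A's while-loop over mutable Int bounds i/j with a tracked res index by a recursion on an (offset, length) window pair that returns the found value itself (an Option), so no result index is maintained at all.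
import Mathlib
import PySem

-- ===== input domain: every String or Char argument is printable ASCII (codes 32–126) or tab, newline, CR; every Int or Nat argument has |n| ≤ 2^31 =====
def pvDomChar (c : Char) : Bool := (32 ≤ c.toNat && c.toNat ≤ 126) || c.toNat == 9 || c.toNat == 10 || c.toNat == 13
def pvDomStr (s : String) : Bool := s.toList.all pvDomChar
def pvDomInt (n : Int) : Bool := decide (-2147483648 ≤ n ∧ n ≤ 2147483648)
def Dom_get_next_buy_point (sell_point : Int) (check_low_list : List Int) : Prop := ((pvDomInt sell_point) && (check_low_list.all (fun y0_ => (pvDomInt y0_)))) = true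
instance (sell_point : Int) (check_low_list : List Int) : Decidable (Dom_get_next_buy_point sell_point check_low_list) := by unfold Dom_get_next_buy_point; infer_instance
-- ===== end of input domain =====

-- B replaces A's while-loop over mutable Int bounds i/j and a tracked res index by a
-- recursion on an (offset, length) Nat pair that propagates the found VALUE back up.

-- ===== PORT A =====
-- A's while-loop: state (i, j, res), mutated in place.
def pvA_loop (sell_point : Int) (xs : List Int) (i j res : Int) : Int :=
  if h : i ≤ j then
    let mid := PySem.Int.floordiv (i + j) 2
    if sell_point < PySem.List.pyGetD xs mid 0 then
      pvA_loop sell_point xs i (mid - 1) mid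
    else
      pvA_loop sell_point xs (mid + 1) j res
  else res
termination_by (j + 1 - i).toNat
decreasing_by
  · have := PySem.Int.floordiv_two_mid_bounds h; omega
  · have := PySem.Int.floordiv_two_mid_bounds h; omega

def get_next_buy_point (sell_point : Int) (check_low_list : List Int) : Int :=
  let j : Int := (check_low_list.length : Int) - 1
  if PySem.List.pyGetD check_low_list j 0 ≤ sell_point then 0
  else PySem.List.pyGetD check_low_list (pvA_loop sell_point check_low_list 0 j j) 0

-- ===== PORT B =====
-- B's helper: recursion on the window LENGTH (a Nat), window described by (lo, length);
-- returns the found value itself (Option Int), no index bookkeeping.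
def pvB_probe (sell_point : Int) (xs : List Int) (lo : Nat) (length : Nat) : Option Int :=
  match length with
  | 0 => none
  | n + 1 =>
    let half := n / 2
    let v := PySem.List.pyGetD xs ((lo + half : Nat) : Int) 0
    if sell_point < v then
      match pvB_probe sell_point xs lo half with
      | none => some v
      | some w => some w
    else
      pvB_probe sell_point xs (lo + half + 1) (n - half)
termination_by length
decreasing_by
  · omega
  · omega

def get_next_buy_point_alt (sell_point : Int) (check_low_list : List Int) : Int :=
  if PySem.List.pyGetD check_low_list (-1) 0 ≤ sell_point then 0
  else
    match pvB_probe sell_point check_low_list 0 check_low_list.length with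
    | none => PySem.List.pyGetD check_low_list (-1) 0
    | some v => v

-- ===== PRECONDITION & SPEC =====
-- Pre_ excludes only the empty list, on which A raises IndexError (check_low_list[-1]).
def Pre_get_next_buy_point (sell_point : Int) (check_low_list : List Int) : Prop :=
  check_low_list ≠ []
instance (sell_point : Int) (check_low_list : List Int) : Decidable (Pre_get_next_buy_point sell_point check_low_list) := by unfold Pre_get_next_buy_point; infer_instance

def pvWitness_get_next_buy_point : Int × List Int := (3, [1, 2, 5, 7])

def Spec_get_next_buy_point (sell_point : Int) (check_low_list : List Int) (out : Int) : Prop := out = get_next_buy_point_alt sell_point check_low_list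
instance (sell_point : Int) (check_low_list : List Int) (out : Int) : Decidable (Spec_get_next_buy_point sell_point check_low_list out) := by unfold Spec_get_next_buy_point; infer_instance

-- ===== CLAIM =====
def Claim_equal_get_next_buy_point : Prop := ∀ (sell_point : Int) (check_low_list : List Int), Dom_get_next_buy_point sell_point check_low_list → Pre_get_next_buy_point sell_point check_low_list → Spec_get_next_buy_point sell_point check_low_list (get_next_buy_point sell_point check_low_list)

-- ===== LEMMAS AND PROOFS =====

-- Indexing A's loop result equals B's probe over the same window, with xs[res] as default.
theorem pvA_loop_eq_probe (sell_point : Int) (xs : List Int) :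
    ∀ i j res : Int, 0 ≤ i →
      PySem.List.pyGetD xs (pvA_loop sell_point xs i j res) 0 =
        (pvB_probe sell_point xs i.toNat (j + 1 - i).toNat).getD
          (PySem.List.pyGetD xs res 0) := by
  intro i j res hi
  fun_induction pvA_loop sell_point xs i j res with
  | case1 i j res h mid hlt ih =>
      have hb := PySem.Int.floordiv_two_mid_bounds h
      have hmid : mid = PySem.Int.floordiv (i + j) 2 := rfl
      have hdv : mid = (i + j) / 2 := by
        rw [hmid]; exact PySem.Int.floordiv_eq_ediv_of_pos (by omega)
      have hlen : (j + 1 - i).toNat = (j - i).toNat + 1 := by omega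
      have hhalf : ((i.toNat + (j - i).toNat / 2 : Nat) : Int) = mid := by omega
      rw [hlen, pvB_probe]
      simp only [hhalf]
      rw [if_pos hlt]
      have hrec : (mid - 1 + 1 - i).toNat = (j - i).toNat / 2 := by omega
      rw [ih hi, hrec]
      cases pvB_probe sell_point xs i.toNat ((j - i).toNat / 2) <;> simp
  | case2 i j res h mid hlt ih =>
      have hb := PySem.Int.floordiv_two_mid_bounds h
      have hmid : mid = PySem.Int.floordiv (i + j) 2 := rfl
      have hdv : mid = (i + j) / 2 := by
        rw [hmid]; exact PySem.Int.floordiv_eq_ediv_of_pos (by omega)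
      have hlen : (j + 1 - i).toNat = (j - i).toNat + 1 := by omega
      have hhalf : ((i.toNat + (j - i).toNat / 2 : Nat) : Int) = mid := by omega
      rw [hlen, pvB_probe]
      simp only [hhalf]
      rw [if_neg hlt]
      have hlo : (mid + 1).toNat = i.toNat + (j - i).toNat / 2 + 1 := by omega
      have hln : (j + 1 - (mid + 1)).toNat = (j - i).toNat - (j - i).toNat / 2 := by
        omega
      rw [ih (by omega), hlo, hln]
  | case3 i j res h =>
      have hlen : (j + 1 - i).toNat = 0 := by omega
      rw [hlen, pvB_probe]
      rfl

-- For a nonempty list, xs[-1] and xs[len-1] agree.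
theorem pvGetD_last (xs : List Int) (h : xs ≠ []) (d : Int) :
    PySem.List.pyGetD xs (-1) d = PySem.List.pyGetD xs ((xs.length : Int) - 1) d := by
  have hl := List.length_pos_iff.mpr h
  rw [PySem.List.pyGetD_neg_one xs d h,
      PySem.List.pyGetD_eq_getElem (xs := xs) (i := (xs.length : Int) - 1) (d := d)
        (by omega) (by omega)]
  have ht : ((xs.length : Int) - 1).toNat = xs.length - 1 := by omega
  simp [List.getLast_eq_getElem, ht]

-- ===== VERDICT =====
theorem get_next_buy_point_spec : Claim_equal_get_next_buy_point := by
  intro sell_point xs _ hne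
  unfold Spec_get_next_buy_point get_next_buy_point get_next_buy_point_alt
  rw [pvGetD_last xs hne 0]
  by_cases hc : PySem.List.pyGetD xs ((xs.length : Int) - 1) 0 ≤ sell_point
  · simp [hc]
  · simp only [if_neg hc]
    rw [pvA_loop_eq_probe sell_point xs 0 ((xs.length : Int) - 1)
          ((xs.length : Int) - 1) le_rfl]
    have hl := List.length_pos_iff.mpr hne
    have h0 : ((0 : Int)).toNat = 0 := rfl
    have hln : (((xs.length : Int) - 1) + 1 - 0).toNat = xs.length := by omega
    rw [h0, hln]
    cases pvB_probe sell_point xs 0 xs.length <;> simp
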